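-- pv_equiv track=rewrite | github.com/day0n/user-profile-analyzer | src/user_profile_analyzer/generate_profile.py | generate_workflow_signature
-- ===== SOURCE A (Python) =====
-- from typing import Dict, List, Optional
-- from collections import defaultdict
--
-- def generate_workflow_signature(nodes: List[Dict]) -> str:
--     """
--     根据节点类型生成工作流签名
--
--     例如: "imageMaker:2,textInput:1,videoMaker:1"
--     """
--     if not nodes:
--         return "empty"
--
--     type_counts = defaultdict(int)
--     for node in nodes:
--         node_type = node.get("type", "unknown")
--         type_counts[node_type] += 1
--
--     # 按类型名排序，生成签名
--     signature = ",".join(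
--         f"{k}:{v}" for k, v in sorted(type_counts.items())
--     )
--     return signature
-- ===== SOURCE B (Python) =====
-- def generate_workflow_signature(nodes):
--     """Sort the raw type values, then emit "type:count" for each run of equal
--     values in one grouped pass (no dict/Counter maintained)."""
--     if not nodes:
--         return "empty"
--     types = sorted(node.get("type", "unknown") for node in nodes)
--     parts = []
--     prev = types[0]
--     run = 0
--     for t in types:
--         if t == prev:
--             run += 1
--         else:
--             parts.append(f"{prev}:{run}")
--             prev = t
--             run = 1
--     parts.append(f"{prev}:{run}")
--     return ",".join(parts)
-- ===== Notes on version B (the rewrite author's own statement) =====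
-- stated objective: alternative
-- what changed: Replaces the defaultdict hash-increment pass plus sorting of (key,count) items by sorting the flat list of type values once and emitting run-length groups in a single scan over the sorted sequence.
import Mathlib
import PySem

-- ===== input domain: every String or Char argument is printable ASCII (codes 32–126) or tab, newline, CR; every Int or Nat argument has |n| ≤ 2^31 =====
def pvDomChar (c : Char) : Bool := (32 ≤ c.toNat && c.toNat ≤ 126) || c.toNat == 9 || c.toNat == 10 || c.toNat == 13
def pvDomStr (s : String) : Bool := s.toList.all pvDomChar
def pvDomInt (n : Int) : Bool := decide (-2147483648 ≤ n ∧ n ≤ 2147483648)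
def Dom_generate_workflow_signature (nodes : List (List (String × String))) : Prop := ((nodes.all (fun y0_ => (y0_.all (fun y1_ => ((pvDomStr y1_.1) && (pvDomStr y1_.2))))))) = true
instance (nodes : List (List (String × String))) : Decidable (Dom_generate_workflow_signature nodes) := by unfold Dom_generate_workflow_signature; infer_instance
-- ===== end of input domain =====

-- B counts by run-length grouping a sorted list of the type values instead of dict
-- increments followed by sorting the items; alternative algorithm, similar cost.

-- ===== PORT A =====
def generate_workflow_signature (nodes : List (List (String × String))) : String :=
  if nodes = [] then "empty"
  else
    let type_counts : PySem.Dict String Int :=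
      nodes.foldl
        (fun d node =>
          d.modify (PySem.Dict.getD (PySem.Dict.ofList node) "type" "unknown") 0 (· + 1))
        PySem.Dict.empty
    PySem.Str.join ","
      ((PySem.List.sorted2 type_counts.items (fun kv => kv.1) (fun kv => kv.2)).map
        (fun kv => kv.1 ++ ":" ++ PySem.Int.toStr kv.2))

-- ===== PORT B =====
def pvFmt (k : String) (v : Int) : String := k ++ ":" ++ PySem.Int.toStr v

def pvStep (st : List String × String × Int) (t : String) : List String × String × Int :=
  if t = st.2.1 then (st.1, st.2.1, st.2.2 + 1)
  else (st.1 ++ [pvFmt st.2.1 st.2.2], t, 1)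

def generate_workflow_signature_alt (nodes : List (List (String × String))) : String :=
  if nodes = [] then "empty"
  else
    let types :=
      PySem.List.sorted
        (nodes.map (fun node => PySem.Dict.getD (PySem.Dict.ofList node) "type" "unknown"))
        (fun x => x)
    match types with
    | [] => "empty"  -- unreachable: nodes ≠ [] forces types ≠ []
    | t0 :: _ =>
      let st := types.foldl pvStep ([], t0, 0)
      PySem.Str.join "," (st.1 ++ [pvFmt st.2.1 st.2.2])

-- ===== PRECONDITION & SPEC =====
def Spec_generate_workflow_signature (nodes : List (List (String × String))) (out : String) : Prop := out = generate_workflow_signature_alt nodes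
instance (nodes : List (List (String × String))) (out : String) : Decidable (Spec_generate_workflow_signature nodes out) := by unfold Spec_generate_workflow_signature; infer_instance

-- ===== CLAIM (what is proved, stated in full; the proofs are below) =====
def Claim_equal_generate_workflow_signature : Prop := ∀ (nodes : List (List (String × String))), Dom_generate_workflow_signature nodes → Spec_generate_workflow_signature nodes (generate_workflow_signature nodes)

-- ===== LEMMAS AND PROOFS =====

-- the run-length decomposition computed by B's loop, as a recursive function
def pvRuns (prev : String) (run : Int) : List String → List (String × Int)
  | [] => [(prev, run)]
  | t :: l => if t = prev then pvRuns prev (run + 1) l else (prev, run) :: pvRuns t 1 l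

theorem pv_foldl_add_of_mem (x : String) :
    ∀ (xs : List String) (acc : PySem.Set String), x ∈ acc →
      List.foldl PySem.Set.add acc xs =
        List.foldl PySem.Set.add acc (xs.filter (fun y => ¬ y = x)) := by
  intro xs
  induction xs with
  | nil => intro acc h; rfl
  | cons y xs ih =>
    intro acc h
    by_cases hyx : y = x
    · subst hyx
      have hadd : PySem.Set.add acc y = acc := by
        simp [PySem.Set.add, PySem.Set.contains, h]
      simp only [List.filter_cons, not_true, decide_false, List.foldl_cons, hadd]
      simpa using ih acc h
    · simp only [List.filter_cons, hyx, not_false_iff, decide_true, if_true, List.foldl_cons]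
      exact ih (PySem.Set.add acc y) (by simp [PySem.Set.add]; split <;> simp [h])

theorem pv_foldl_add_cons (x : String) :
    ∀ (xs : List String) (acc : List String), x ∉ xs →
      List.foldl PySem.Set.add (x :: acc) xs = x :: List.foldl PySem.Set.add acc xs := by
  intro xs
  induction xs with
  | nil => intro acc _; rfl
  | cons y xs ih =>
    intro acc h
    have hyx : ¬ (y = x) := fun he => h (by simp [he])
    have hx : x ∉ xs := fun hm => h (by simp [hm])
    have hc : PySem.Set.add (x :: acc) y = x :: PySem.Set.add acc y := by
      simp [PySem.Set.add, PySem.Set.contains, hyx]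
      split <;> simp
    simp only [List.foldl_cons, hc]
    exact ih (PySem.Set.add acc y) hx

theorem pv_ofList_cons_filter (x : String) (xs : List String) :
    PySem.Set.ofList (x :: xs) = x :: PySem.Set.ofList (xs.filter (fun y => ¬ y = x)) := by
  have h1 : PySem.Set.ofList (x :: xs) = List.foldl PySem.Set.add [x] xs := rfl
  rw [h1, pv_foldl_add_of_mem x xs [x] (by simp)]
  have h2 : x ∉ xs.filter (fun y => ¬ y = x) := by simp
  have := pv_foldl_add_cons x (xs.filter (fun y => ¬ y = x)) [] h2
  simpa [PySem.Set.ofList, PySem.Set.empty] using this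

theorem pv_pairwise_lt_ofList :
    ∀ (l : List String), l.Pairwise (· ≤ ·) → (PySem.Set.ofList l).Pairwise (· < ·) := by
  intro l
  induction hn : l.length using Nat.strong_induction_on generalizing l with
  | _ n ih =>
    match l with
    | [] => intro _; simp [PySem.Set.ofList, PySem.Set.empty]
    | t :: rest =>
      intro hp
      rw [pv_ofList_cons_filter]
      have hle : ∀ y ∈ rest, t ≤ y := (List.pairwise_cons.1 hp).1
      have hpr : rest.Pairwise (· ≤ ·) := (List.pairwise_cons.1 hp).2
      have hfil : (rest.filter (fun y => ¬ y = t)).Pairwise (· ≤ ·) := hpr.filter _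
      have hlen : (rest.filter (fun y => ¬ y = t)).length < n := by
        have := List.length_filter_le (fun y => decide (¬ y = t)) rest
        simp at hn; omega
      refine List.pairwise_cons.2 ⟨?_, ih _ hlen _ rfl hfil⟩
      intro y hy
      have hy' : y ∈ rest.filter (fun y => ¬ y = t) := (PySem.Set.mem_ofList _ _).1 hy
      have h1 : y ∈ rest := List.mem_of_mem_filter hy'
      have h2 : ¬ y = t := by
        have := List.of_mem_filter hy'; simpa using this
      exact lt_of_le_of_ne (hle y h1) (Ne.symm h2)

theorem pv_foldl_step_spec :
    ∀ (l : List String) (parts : List String) (prev : String) (run : Int),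
      (l.foldl pvStep (parts, prev, run)).1 ++
          [pvFmt (l.foldl pvStep (parts, prev, run)).2.1 (l.foldl pvStep (parts, prev, run)).2.2] =
        parts ++ (pvRuns prev run l).map (fun kv => pvFmt kv.1 kv.2) := by
  intro l
  induction l with
  | nil => intro parts prev run; simp [pvRuns]
  | cons t l ih =>
    intro parts prev run
    by_cases h : t = prev
    · simp only [List.foldl_cons, pvStep, pvRuns, h, if_true]
      exact ih parts prev (run + 1)
    · simp only [List.foldl_cons, pvStep, pvRuns, h, if_false]
      rw [ih (parts ++ [pvFmt prev run]) t 1]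
      simp

theorem pv_runs_sorted :
    ∀ (l : List String) (prev : String) (run : Int),
      l.Pairwise (· ≤ ·) → (∀ t ∈ l, prev ≤ t) →
      pvRuns prev run l =
        (prev, run + (l.count prev : Int)) ::
          (PySem.Set.ofList (l.filter (fun t => ¬ t = prev))).map
            (fun k => (k, (l.count k : Int))) := by
  intro l
  induction l with
  | nil => intro prev run _ _; simp [pvRuns, PySem.Set.ofList, PySem.Set.empty]
  | cons t l ih =>
    intro prev run hp hle
    have hle' : ∀ y ∈ l, t ≤ y := (List.pairwise_cons.1 hp).1
    have hpl : l.Pairwise (· ≤ ·) := (List.pairwise_cons.1 hp).2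
    by_cases h : t = prev
    · subst h
      rw [pvRuns, if_pos rfl, ih t (run + 1) hpl hle']
      have hc : ((t :: l).count t : Int) = (l.count t : Int) + 1 := by
        simp
      have hfil : (t :: l).filter (fun y => ¬ y = t) = l.filter (fun y => ¬ y = t) := by
        simp
      rw [hfil, hc]
      refine congrArg₂ _ (by ring_nf) ?_
      apply List.map_congr_left
      intro k hk
      have hk' : k ∈ l.filter (fun y => ¬ y = t) := (PySem.Set.mem_ofList _ _).1 hk
      have hne : ¬ k = t := by have := List.of_mem_filter hk'; simpa using this
      simp [Ne.symm hne]
    · -- t ≠ prev: prev < t, so prev occurs nowhere in t :: l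
      have hpt : prev < t := lt_of_le_of_ne (hle t (by simp)) (fun he => h he.symm)
      have hnotin : prev ∉ t :: l := by
        intro hm
        rcases List.mem_cons.1 hm with he | hm'
        · exact h he.symm
        · exact absurd (hle' prev hm') (not_le.2 hpt)
      have hcp : ((t :: l).count prev : Int) = 0 := by
        rw [List.count_eq_zero.2 hnotin]; rfl
      have hfil : (t :: l).filter (fun y => ¬ y = prev) = t :: l := by
        rw [List.filter_eq_self]
        intro y hy
        simp only [decide_eq_true_eq]
        intro he; exact hnotin (he ▸ hy)
      rw [pvRuns, if_neg h, ih t 1 hpl hle', hfil, hcp, pv_ofList_cons_filter]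
      simp only [List.map_cons, add_zero]
      refine congrArg _ (congrArg₂ _ ?_ ?_)
      · have : (t :: l).count t = l.count t + 1 := by simp
        rw [this]; push_cast; ring_nf
      · apply List.map_congr_left
        intro k hk
        have hk' : k ∈ l.filter (fun y => ¬ y = t) := (PySem.Set.mem_ofList _ _).1 hk
        have hne : ¬ k = t := by have := List.of_mem_filter hk'; simpa using this
        simp [Ne.symm hne]

theorem pv_insertBy_congr {α : Type} (b1 b2 : α → α → Bool) (x : α) :
    ∀ (ys : List α), (∀ y ∈ ys, b1 x y = b2 x y) →
      PySem.List.insertBy b1 x ys = PySem.List.insertBy b2 x ys := by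
  intro ys
  induction ys with
  | nil => intro _; rfl
  | cons y ys ih =>
    intro h
    rw [PySem.List.insertBy, PySem.List.insertBy, h y (by simp)]
    by_cases hb : b2 x y = true
    · simp [hb]
    · simp only [Bool.not_eq_true] at hb
      simp [hb, ih (fun z hz => h z (by simp [hz]))]

theorem pv_foldl_insertBy_congr {α : Type} (b1 b2 : α → α → Bool) (S : List α)
    (h : ∀ a ∈ S, ∀ b ∈ S, b1 a b = b2 a b) :
    ∀ (xs acc : List α), (∀ a ∈ xs, a ∈ S) → (∀ a ∈ acc, a ∈ S) →
      xs.foldl (fun acc x => PySem.List.insertBy b1 x acc) acc =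
        xs.foldl (fun acc x => PySem.List.insertBy b2 x acc) acc := by
  intro xs
  induction xs with
  | nil => intro acc _ _; rfl
  | cons x xs ih =>
    intro acc hxs hacc
    have hxS : x ∈ S := hxs x (by simp)
    have h1 : PySem.List.insertBy b1 x acc = PySem.List.insertBy b2 x acc :=
      pv_insertBy_congr b1 b2 x acc (fun y hy => h x hxS y (hacc y hy))
    simp only [List.foldl_cons, h1]
    refine ih _ (fun a ha => hxs a (by simp [ha])) ?_
    intro a ha
    rcases (PySem.List.insertBy_mem_iff b2 x a acc).1 ha with he | hm
    · exact he ▸ hxS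
    · exact hacc a hm

-- sorted(list of pairs) = sorted by first component, when the firsts are distinct
theorem pv_sorted2_eq_sorted_fst (xs : List (String × Int))
    (hnd : (xs.map (fun kv => kv.1)).Nodup) :
    PySem.List.sorted2 xs (fun kv => kv.1) (fun kv => kv.2) =
      PySem.List.sorted xs (fun kv => kv.1) := by
  have hinj := List.inj_on_of_nodup_map hnd
  rw [PySem.List.sorted_eq_foldl_insertBy]
  show List.foldl (fun acc x => PySem.List.insertBy _ x acc) [] xs = _
  apply pv_foldl_insertBy_congr _ _ xs _ xs [] (fun a ha => ha) (by simp)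
  intro a ha b hb
  by_cases hab : a = b
  · subst hab
    simp
  · have hfst : a.1 ≠ b.1 := fun he => hab (hinj ha hb he)
    rcases lt_or_gt_of_ne hfst with hlt | hgt
    · simp [hlt, not_lt.2 (le_of_lt hlt)]
    · simp [hgt, not_lt.2 (le_of_lt hgt)]

-- the common core: A's sorted items of the counter render the same strings as B's grouped run scan
theorem pv_core (ts : List String) (t0 : String) (rest : List String)
    (he : PySem.List.sorted ts (fun x => x) = t0 :: rest) :
    (PySem.List.sorted2 (PySem.Dict.counter ts).items (fun kv => kv.1) (fun kv => kv.2)).map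
        (fun kv => kv.1 ++ ":" ++ PySem.Int.toStr kv.2)
      = ((t0 :: rest).foldl pvStep ([], t0, 0)).1 ++
          [pvFmt ((t0 :: rest).foldl pvStep ([], t0, 0)).2.1
                 ((t0 :: rest).foldl pvStep ([], t0, 0)).2.2] := by
  have hpw : (t0 :: rest).Pairwise (· ≤ ·) := by
    have := PySem.List.sorted_pairwise ts (fun x => x)
    rw [he] at this; exact this
  have hle : ∀ t ∈ t0 :: rest, t0 ≤ t := by
    intro t ht
    rcases List.mem_cons.1 ht with h | h
    · exact h ▸ le_refl t0
    · exact (List.pairwise_cons.1 hpw).1 t h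
  have hperm' : (t0 :: rest).Perm ts := by
    have := PySem.List.sorted_perm ts (fun x => x) false
    rwa [he] at this
  have hcount : ∀ k, (t0 :: rest).count k = ts.count k := fun k => hperm'.count_eq k
  have hruns : pvRuns t0 0 (t0 :: rest)
      = (PySem.Set.ofList (t0 :: rest)).map (fun k => (k, ((t0 :: rest).count k : Int))) := by
    rw [pv_runs_sorted (t0 :: rest) t0 0 hpw hle, pv_ofList_cons_filter]
    simp
  have hnd : (((PySem.Dict.counter ts).items).map (fun kv => kv.1)).Nodup := by
    rw [PySem.Dict.items_counter, List.map_map]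
    have hid : List.map ((fun kv => kv.1) ∘ fun k => (k, (ts.count k : Int)))
        (PySem.Set.ofList ts) = PySem.Set.ofList ts := by
      simp [Function.comp_def]
    rw [hid]
    exact PySem.Set.nodup_ofList ts
  have hperm : (PySem.Set.ofList (t0 :: rest)).Perm (PySem.Set.ofList ts) := by
    refine (List.perm_ext_iff_of_nodup (PySem.Set.nodup_ofList _) (PySem.Set.nodup_ofList _)).2 ?_
    intro a
    rw [PySem.Set.mem_ofList, PySem.Set.mem_ofList, ← he, PySem.List.mem_sorted]
  have hpwlt : (PySem.Set.ofList (t0 :: rest)).Pairwise (· < ·) := pv_pairwise_lt_ofList _ hpw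
  have hys_perm : ((PySem.Set.ofList (t0 :: rest)).map (fun k => (k, (ts.count k : Int)))).Perm
      ((PySem.Dict.counter ts).items) := by
    rw [PySem.Dict.items_counter]
    exact hperm.map _
  have hys_pw : ((PySem.Set.ofList (t0 :: rest)).map (fun k => (k, (ts.count k : Int)))).Pairwise
      (fun a b => a.1 < b.1) := by
    rw [List.pairwise_map]
    exact hpwlt
  have h3 : PySem.List.sorted (PySem.Dict.counter ts).items (fun kv => kv.1)
      = (PySem.Set.ofList (t0 :: rest)).map (fun k => (k, (ts.count k : Int))) :=
    PySem.List.sorted_eq_of_perm_of_pairwise_lt _ _ _ hys_perm hys_pw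
  rw [pv_sorted2_eq_sorted_fst _ hnd, h3, pv_foldl_step_spec, hruns]
  simp only [List.map_map, List.nil_append]
  apply List.map_congr_left
  intro k _
  simp [pvFmt, hcount k]

-- ===== VERDICT (by name: the statement is the Claim_ definition above) =====
theorem generate_workflow_signature_spec : Claim_equal_generate_workflow_signature := by
  intro nodes _
  unfold Spec_generate_workflow_signature
  by_cases hn : nodes = []
  · simp [generate_workflow_signature, generate_workflow_signature_alt, hn]
  · have hts : nodes.map (fun node => PySem.Dict.getD (PySem.Dict.ofList node) "type" "unknown") ≠ [] := by
      simpa using hn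
    have hne : PySem.List.sorted
        (nodes.map (fun node => PySem.Dict.getD (PySem.Dict.ofList node) "type" "unknown"))
        (fun x => x) ≠ [] := by
      rw [Ne, PySem.List.sorted_eq_nil_iff]
      exact hts
    obtain ⟨t0, rest, he⟩ := List.exists_cons_of_ne_nil hne
    have hfold : nodes.foldl
        (fun d node => d.modify (PySem.Dict.getD (PySem.Dict.ofList node) "type" "unknown") 0 (· + 1))
        PySem.Dict.empty
        = PySem.Dict.counter (nodes.map (fun node => PySem.Dict.getD (PySem.Dict.ofList node) "type" "unknown")) := by
      rw [PySem.Dict.counter_eq_foldl, List.foldl_map]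
    simp only [generate_workflow_signature, generate_workflow_signature_alt, if_neg hn, hfold, he]
    exact congrArg _ (pv_core _ t0 rest he)
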